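-- pv_equiv track=rewrite | github.com/ruiz-salvat/morfeo | Archive/Simulator/Patterns/BoltPattern.py | numeric_to_binary_array
-- ===== SOURCE A (Python) =====
-- def numeric_to_binary_array(value, size):
--     str_binary_array = bin(value).split('b')[1]
--     aux_str = ''
--     for i in range(len(str_binary_array), size):
--         aux_str = aux_str + '0'
--     aux_str = aux_str + str_binary_array
--     binary_array = list(map(lambda x: x == '1', aux_str))
--     return binary_array
-- ===== SOURCE B (Python) =====
-- def numeric_to_binary_array(value, size):
--     n = abs(value)
--     length = max(size, max(1, n.bit_length()))
--     return [(n >> (length - 1 - i)) & 1 == 1 for i in range(length)]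
-- ===== Notes on version B (the rewrite author's own statement) =====
-- stated objective: idiomatic
-- what changed: B drops A's bin()-string formatting, splitting and character padding entirely and extracts the bits arithmetically: n = abs(value), output length max(size, max(1, n.bit_length())), each element ((n >> k) & 1) == 1.
import Mathlib
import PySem

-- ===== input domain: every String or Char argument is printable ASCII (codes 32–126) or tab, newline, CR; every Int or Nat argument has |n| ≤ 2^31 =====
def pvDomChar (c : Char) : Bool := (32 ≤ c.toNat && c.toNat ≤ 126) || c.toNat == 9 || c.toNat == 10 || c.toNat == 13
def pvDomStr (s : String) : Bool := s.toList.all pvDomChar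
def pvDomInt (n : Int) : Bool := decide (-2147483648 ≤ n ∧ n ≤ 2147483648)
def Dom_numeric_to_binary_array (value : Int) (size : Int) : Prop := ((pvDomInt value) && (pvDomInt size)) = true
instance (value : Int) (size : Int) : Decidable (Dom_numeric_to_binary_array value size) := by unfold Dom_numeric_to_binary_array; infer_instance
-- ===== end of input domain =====

-- B drops the string formatting of A and extracts the bits arithmetically (abs, bit_length, shifts); alternative decomposition, not claimed faster.

-- ===== PORT A =====
-- A: str_binary_array = bin(value).split('b')[1]; then left-pad with '0' up to `size`; then map (== '1').
-- bin(value) = PySem.Int.toBinChars0b; .split('b') = PySem.Chars.splitOn; [1] = pyGet? 1 (always present, bin() always contains 'b', so getD [] never fires).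
def numeric_to_binary_array (value : Int) (size : Int) : List Bool :=
  let str_binary_array :=
    (PySem.List.pyGet? (PySem.Chars.splitOn (PySem.Int.toBinChars0b value) ['b']) 1).getD []
  let aux_str :=
    (PySem.List.pyRange (str_binary_array.length : Int) size 1).foldl
      (fun acc _ => acc ++ ['0']) []
  let aux_str2 := aux_str ++ str_binary_array
  aux_str2.map (fun x => x == '1')

-- ===== PORT B =====
-- B: n = abs(value); length = max(size, max(1, n.bit_length())); [(n >> (length-1-i)) & 1 == 1 for i in range(length)]
def numeric_to_binary_array_alt (value : Int) (size : Int) : List Bool :=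
  let n : Int := |value|
  let length : Int := max size (max 1 (PySem.Int.bitLength n : Int))
  (PySem.List.pyRange 0 length 1).map
    (fun i => PySem.Int.band (n >>> (length - 1 - i).toNat) 1 == 1)

-- ===== PRECONDITION & SPEC =====
def Spec_numeric_to_binary_array (value : Int) (size : Int) (out : List Bool) : Prop := out = numeric_to_binary_array_alt value size
instance (value : Int) (size : Int) (out : List Bool) : Decidable (Spec_numeric_to_binary_array value size out) := by unfold Spec_numeric_to_binary_array; infer_instance

-- ===== CLAIM (what is proved, stated in full; the proofs are below) =====
def Claim_equal_numeric_to_binary_array : Prop := ∀ (value : Int) (size : Int), Dom_numeric_to_binary_array value size → Spec_numeric_to_binary_array value size (numeric_to_binary_array value size)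

-- ===== LEMMAS AND PROOFS =====

-- msb-first binary digits of a Nat, the recursion Nat.toDigits 2 follows
def binCh : Nat → List Char
  | m => if m < 2 then [Nat.digitChar m] else binCh (m / 2) ++ [Nat.digitChar (m % 2)]
  decreasing_by exact Nat.div_lt_self (by omega) (by omega)

-- msb-first bit list of m, width L
def bitsW (m L : Nat) : List Bool := (List.range L).map (fun i => decide (m >>> (L - 1 - i) % 2 = 1))

lemma toDigitsCore_two (m : Nat) : ∀ fuel ds, m < fuel → Nat.toDigitsCore 2 fuel m ds = binCh m ++ ds := by
  induction m using Nat.strong_induction_on with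
  | _ m ih =>
    intro fuel ds hf
    match fuel with
    | fuel + 1 =>
      rw [Nat.toDigitsCore]
      by_cases h2 : m < 2
      · have hz : m / 2 = 0 := by omega
        have hm : m % 2 = m := by omega
        simp [hz, hm, binCh, h2]
      · have hne : ¬ m / 2 = 0 := by omega
        simp only [hne, if_neg, not_false_iff]
        rw [ih (m / 2) (Nat.div_lt_self (by omega) (by omega)) fuel (Nat.digitChar (m % 2) :: ds)
          (by omega)]
        conv_rhs => rw [binCh]
        simp [h2]

lemma toDigits_two (m : Nat) : Nat.toDigits 2 m = binCh m := by
  simpa using toDigitsCore_two m (m + 1) [] (by omega)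

lemma binCh_mem (m : Nat) : ∀ c ∈ binCh m, c = '0' ∨ c = '1' := by
  induction m using Nat.strong_induction_on with
  | _ m ih =>
    rw [binCh]
    by_cases h2 : m < 2
    · interval_cases m <;> simp [Nat.digitChar]
    · simp only [h2, if_neg, not_false_iff, List.mem_append, List.mem_singleton]
      intro c hc
      rcases hc with hc | hc
      · exact ih (m / 2) (Nat.div_lt_self (by omega) (by omega)) c hc
      · have h01 : m % 2 = 0 ∨ m % 2 = 1 := by omega
        rcases h01 with h | h <;> simp [hc, h, Nat.digitChar]

lemma binCh_length (m : Nat) : (binCh m).length = max 1 (PySem.Int.bitLength (m : Int)) := by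
  induction m using Nat.strong_induction_on with
  | _ m ih =>
    rw [binCh]
    by_cases h2 : m < 2
    · interval_cases m <;> decide
    · have hb : PySem.Int.bitLength (m : Int) = PySem.Int.bitLength ((m / 2 : Nat) : Int) + 1 :=
        PySem.Int.bitLength_natCast (m := m) (by omega)
      have h3 : 1 ≤ PySem.Int.bitLength ((m / 2 : Nat) : Int) := by
        rw [PySem.Int.bitLength_natCast (m := m / 2) (by omega)]; omega
      have := ih (m / 2) (Nat.div_lt_self (by omega) (by omega))
      simp only [h2, if_neg, not_false_iff, List.length_append, List.length_singleton, this, hb]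
      omega

lemma go_step_ne (f : Nat) (c : Char) (rest cur : List Char) (acc : List (List Char))
    (hc : ¬ c = 'b') :
    PySem.Chars.splitOn.go ['b'] (f + 1) (c :: rest) cur acc
      = PySem.Chars.splitOn.go ['b'] f rest (c :: cur) acc := by
  rw [PySem.Chars.splitOn.go]
  have hpre : List.isPrefixOf ['b'] (c :: rest) = false := by
    simp [List.isPrefixOf]
    intro h; exact hc h.symm
  simp [hpre]

lemma go_step_b (f : Nat) (rest cur : List Char) (acc : List (List Char)) :
    PySem.Chars.splitOn.go ['b'] (f + 1) ('b' :: rest) cur acc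
      = PySem.Chars.splitOn.go ['b'] f rest [] (cur.reverse :: acc) := by
  rw [PySem.Chars.splitOn.go]
  have hpre : List.isPrefixOf ['b'] ('b' :: rest) = true := by
    simp [List.isPrefixOf]
  simp [hpre]

lemma go_no_sep (l : List Char) (hb : 'b' ∉ l) :
    ∀ fuel cur acc, l.length < fuel →
      PySem.Chars.splitOn.go ['b'] fuel l cur acc = ((cur.reverse ++ l) :: acc).reverse := by
  induction l with
  | nil =>
    intro fuel cur acc hf
    match fuel with
    | f + 1 => rw [PySem.Chars.splitOn.go] <;> simp
  | cons c rest ih =>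
    intro fuel cur acc hf
    match fuel with
    | f + 1 =>
      have hc : ¬ c = 'b' := by
        intro h; exact hb (by simp [h])
      rw [go_step_ne f c rest cur acc hc,
        ih (by intro h; exact hb (List.mem_cons_of_mem _ h)) f (c :: cur) acc
          (by simp at hf ⊢; omega)]
      simp

lemma split_bin (value : Int) :
    (PySem.List.pyGet? (PySem.Chars.splitOn (PySem.Int.toBinChars0b value) ['b']) 1).getD []
      = binCh value.natAbs := by
  have hnb : 'b' ∉ binCh value.natAbs := by
    intro h
    rcases binCh_mem value.natAbs 'b' h with h' | h' <;> simp at h'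
  by_cases hv : value < 0
  · have habs : value.toNat = 0 := by omega
    rw [PySem.Int.toBinChars0b]
    simp only [hv, if_pos]
    rw [toDigits_two, PySem.Chars.splitOn]
    simp only [List.length_cons]
    rw [go_step_ne _ '-' _ _ _ (by decide), go_step_ne _ '0' _ _ _ (by decide), go_step_b,
      go_no_sep _ hnb _ _ _ (by omega)]
    simp [PySem.List.pyGet?, PySem.List.pyIdx?]
  · have habs : value.toNat = value.natAbs := by omega
    rw [PySem.Int.toBinChars0b]
    simp only [hv, if_neg, not_false_iff]
    rw [habs, toDigits_two, PySem.Chars.splitOn]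
    simp only [List.length_cons]
    rw [go_step_ne _ '0' _ _ _ (by decide), go_step_b,
      go_no_sep _ hnb _ _ _ (by omega)]
    simp [PySem.List.pyGet?, PySem.List.pyIdx?]

lemma shift_div (m k : Nat) : m >>> (k + 1) = (m / 2) >>> k := by
  rw [Nat.shiftRight_eq_div_pow, Nat.shiftRight_eq_div_pow, pow_succ',
    Nat.div_div_eq_div_mul, Nat.mul_comm]

lemma bitsW_succ (m L : Nat) : bitsW m (L + 1) = bitsW (m / 2) L ++ [decide (m % 2 = 1)] := by
  unfold bitsW
  rw [List.range_succ, List.map_append]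
  congr 1
  · apply List.map_congr_left
    intro i hi
    have hiL : i < L := List.mem_range.mp hi
    have h1 : L + 1 - 1 - i = (L - 1 - i) + 1 := by omega
    rw [h1, shift_div]
  · simp

lemma bitsW_cons (m L : Nat) : bitsW m (L + 1) = decide (m >>> L % 2 = 1) :: bitsW m L := by
  unfold bitsW
  rw [List.range_succ_eq_map, List.map_cons, List.map_map]
  congr 1
  apply List.map_congr_left
  intro i _
  simp only [Function.comp_apply, Nat.succ_eq_add_one]
  rw [show L + 1 - 1 - (i + 1) = L - 1 - i by omega]

lemma binCh_map (m : Nat) : (binCh m).map (fun x => x == '1') = bitsW m (binCh m).length := by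
  induction m using Nat.strong_induction_on with
  | _ m ih =>
    conv_lhs => rw [binCh]
    conv_rhs => rw [binCh]
    by_cases h2 : m < 2
    · interval_cases m <;> decide
    · simp only [h2, if_neg, not_false_iff, List.map_append, List.length_append,
        List.length_singleton, List.map_cons, List.map_nil]
      rw [bitsW_succ, ih (m / 2) (Nat.div_lt_self (by omega) (by omega))]
      congr 1
      have h01 : m % 2 = 0 ∨ m % 2 = 1 := by omega
      rcases h01 with h | h <;> simp [h, Nat.digitChar]

lemma m_lt_pow (m : Nat) : m < 2 ^ (binCh m).length := by
  induction m using Nat.strong_induction_on with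
  | _ m ih =>
    rw [binCh]
    by_cases h2 : m < 2
    · simp only [h2, if_pos, List.length_singleton]; omega
    · have := ih (m / 2) (Nat.div_lt_self (by omega) (by omega))
      simp only [h2, if_neg, not_false_iff, List.length_append, List.length_singleton]
      rw [pow_succ]
      omega

lemma bitsW_pad (m L : Nat) (hL : (binCh m).length ≤ L) :
    bitsW m L = List.replicate (L - (binCh m).length) false ++ bitsW m (binCh m).length := by
  set len := (binCh m).length with hlen
  obtain ⟨k, rfl⟩ : ∃ k, L = len + k := ⟨L - len, by omega⟩
  clear hL
  induction k with
  | zero => simp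
  | succ k ihk =>
    have hsh : m >>> (len + k) = 0 := by
      rw [Nat.shiftRight_eq_div_pow]
      apply Nat.div_eq_of_lt
      calc m < 2 ^ len := m_lt_pow m
        _ ≤ 2 ^ (len + k) := Nat.pow_le_pow_right (by omega) (by omega)
    have : len + (k + 1) = (len + k) + 1 := by omega
    rw [this, bitsW_cons, ihk, hsh]
    rw [show len + k + 1 - len = (len + k - len) + 1 by omega, List.replicate_succ]
    simp

-- ===== VERDICT (by name: the statement is the Claim_ definition above) =====
theorem numeric_to_binary_array_spec : Claim_equal_numeric_to_binary_array := by
  intro value size _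
  unfold Spec_numeric_to_binary_array
  simp only [numeric_to_binary_array, numeric_to_binary_array_alt]
  rw [split_bin]
  simp only [Int.abs_eq_natAbs]
  set n := value.natAbs with hn
  set bl := PySem.Int.bitLength ((n : Nat) : Int) with hbl
  set Bn : Nat := max 1 bl with hBn
  have hlen : (binCh n).length = Bn := binCh_length n
  have hcast : max (1 : Int) (bl : Int) = (Bn : Int) := by rw [hBn]; simp [Nat.cast_max]
  rw [hcast]
  set L : Int := max size (Bn : Int) with hL
  have hBn1 : 1 ≤ Bn := le_max_left _ _
  have hBL : (Bn : Int) ≤ L := le_max_right _ _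
  have hpad : (PySem.List.pyRange ((binCh n).length : Int) size 1).foldl
        (fun acc _ => acc ++ ['0']) []
      = List.replicate ((size - ((binCh n).length : Int)).toNat) '0' := by
    rw [show (fun (acc : List Char) (_ : Int) => acc ++ ['0'])
          = (fun (acc : List Char) (x : Int) => acc ++ [(fun (_ : Int) => '0') x]) from rfl,
      PySem.List.foldl_append_singleton_eq_map, List.map_const', PySem.List.length_pyRange_one]
    simp
  rw [hpad, List.map_append, List.map_replicate]
  have hR : (PySem.List.pyRange 0 L 1).map
        (fun i => PySem.Int.band (((n : Nat) : Int) >>> (L - 1 - i).toNat) 1 == 1)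
      = bitsW n L.toNat := by
    rw [PySem.List.pyRange_one, Int.sub_zero]
    unfold bitsW
    rw [List.map_map]
    apply List.map_congr_left
    intro k hk
    have hk' : k < L.toNat := List.mem_range.mp hk
    simp only [Function.comp_apply]
    rw [show (L - 1 - (0 + (k : Int))).toNat = L.toNat - 1 - k by omega]
    rw [show ((n : Nat) : Int) >>> (L.toNat - 1 - k) = ((n >>> (L.toNat - 1 - k) : Nat) : Int)
        from (Int.natCast_shiftRight _ _).symm]
    rw [show (1 : Int) = ((1 : Nat) : Int) from rfl, PySem.Int.band_natCast,
      Nat.and_one_is_mod]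
    rcases Nat.mod_two_eq_zero_or_one (n >>> (L.toNat - 1 - k)) with h | h <;> simp [h]
  rw [hR, binCh_map]
  have hle : (binCh n).length ≤ L.toNat := by rw [hlen]; omega
  rw [bitsW_pad n L.toNat hle]
  have hp : (size - ((Bn : Nat) : Int)).toNat = L.toNat - Bn := by
    rcases le_total size ((Bn : Nat) : Int) with h | h
    · rw [hL, max_eq_right h]; omega
    · rw [hL, max_eq_left h]; omega
  rw [hlen, hp]
  simp
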